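-- pv_equiv track=rewrite | github.com/oracle12cr2/luna-vault | lotto/buy_lotto.py | check_consecutive_limit
-- ===== SOURCE A (Python) =====
-- def check_consecutive_limit(numbers):
--     """전략 5: 연속번호 제한 (최대 2개)"""
--     s = sorted(numbers)
--     max_consec = 1
--     cur = 1
--     for i in range(1, len(s)):
--         if s[i] == s[i-1] + 1:
--             cur += 1
--             max_consec = max(max_consec, cur)
--         else:
--             cur = 1
--     return max_consec <= 2
-- ===== SOURCE B (Python) =====
-- def check_consecutive_limit(numbers):
--     """전략 5: 연속번호 제한 (최대 2개)"""
--     s = sorted(numbers)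
--     return not any(b == a + 1 and c == b + 1 for a, b, c in zip(s, s[1:], s[2:]))
-- ===== Notes on version B (the rewrite author's own statement) =====
-- stated objective: idiomatic
-- what changed: Replaces the manual cur/max_consec run-length accumulator loop with a sliding-window check: after sorting, return whether no adjacent triple (a,b,c) satisfies b==a+1 and c==b+1 (a run longer than 2 exists iff such a triple exists).
import Mathlib
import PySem

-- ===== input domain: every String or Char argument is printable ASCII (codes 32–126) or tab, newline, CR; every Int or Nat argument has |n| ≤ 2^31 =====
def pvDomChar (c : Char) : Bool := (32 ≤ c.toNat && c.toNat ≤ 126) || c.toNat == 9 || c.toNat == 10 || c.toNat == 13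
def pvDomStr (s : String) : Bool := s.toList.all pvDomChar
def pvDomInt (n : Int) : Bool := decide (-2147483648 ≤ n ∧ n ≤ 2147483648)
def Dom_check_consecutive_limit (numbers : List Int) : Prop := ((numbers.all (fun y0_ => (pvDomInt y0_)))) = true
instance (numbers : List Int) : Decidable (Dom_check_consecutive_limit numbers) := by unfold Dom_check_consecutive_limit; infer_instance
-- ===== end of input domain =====

-- B replaces A's run-length accumulator loop with a sliding triple-window check after sorting (idiomatic; same cost).

-- ===== PORT A =====
-- the loop indices i and i-1 are always in range, so pyGetD's default 0 is never used
def check_consecutive_limit (numbers : List Int) : Bool :=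
  let s := PySem.List.sorted numbers (fun x => x) false
  let r := (PySem.List.pyRange 1 (s.length : Int) 1).foldl
    (fun (st : Int × Int) i =>
      if PySem.List.pyGetD s i 0 = PySem.List.pyGetD s (i - 1) 0 + 1 then
        (max st.1 (st.2 + 1), st.2 + 1)
      else
        (st.1, 1)) (1, 1)
  decide (r.1 ≤ 2)

-- ===== PORT B =====
-- 'any(b == a+1 and c == b+1 for a,b,c in zip(s, s[1:], s[2:]))', negated, as a walk over triple windows
def pvNoTriple : List Int → Bool
  | a :: b :: c :: rest => if b = a + 1 ∧ c = b + 1 then false else pvNoTriple (b :: c :: rest)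
  | _ => true

def check_consecutive_limit_alt (numbers : List Int) : Bool :=
  pvNoTriple (PySem.List.sorted numbers (fun x => x) false)

-- ===== PRECONDITION & SPEC =====
def Spec_check_consecutive_limit (numbers : List Int) (out : Bool) : Prop := out = check_consecutive_limit_alt numbers
instance (numbers : List Int) (out : Bool) : Decidable (Spec_check_consecutive_limit numbers out) := by unfold Spec_check_consecutive_limit; infer_instance

-- ===== CLAIM (what is proved, stated in full; the proofs are below) =====
def Claim_equal_check_consecutive_limit : Prop := ∀ (numbers : List Int), Dom_check_consecutive_limit numbers → Spec_check_consecutive_limit numbers (check_consecutive_limit numbers)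

-- ===== LEMMAS AND PROOFS =====

-- structural form of A's loop: state (max_consec, cur), previous element, remaining tail
def pvLoopA : Int × Int → Int → List Int → Int × Int
  | st, _, [] => st
  | st, prev, x :: rest =>
    if x = prev + 1 then pvLoopA (max st.1 (st.2 + 1), st.2 + 1) x rest
    else pvLoopA (st.1, 1) x rest

-- length of the longest step-1 run, given a run of length cur ends at prev
def pvMaxRun : Int → Int → List Int → Int
  | cur, _, [] => cur
  | cur, prev, x :: rest =>
    if x = prev + 1 then pvMaxRun (cur + 1) x rest
    else max cur (pvMaxRun 1 x rest)

theorem pvMaxRun_ge (t : List Int) : ∀ cur prev, cur ≤ pvMaxRun cur prev t := by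
  induction t with
  | nil => intro cur prev; simp [pvMaxRun]
  | cons x rest ih =>
    intro cur prev
    simp only [pvMaxRun]
    split
    · exact le_trans (by omega) (ih (cur + 1) x)
    · exact le_max_left _ _

theorem pvLoopA_fst (t : List Int) :
    ∀ (st : Int × Int) prev, 1 ≤ st.2 → st.2 ≤ st.1 →
      (pvLoopA st prev t).1 = max st.1 (pvMaxRun st.2 prev t) := by
  induction t with
  | nil => intro st prev h1 h2; simp [pvLoopA, pvMaxRun]; omega
  | cons x rest ih =>
    intro st prev h1 h2
    simp only [pvLoopA, pvMaxRun]
    split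
    · rw [ih (max st.1 (st.2 + 1), st.2 + 1) x (by omega) (by simp)]
      have := pvMaxRun_ge rest (st.2 + 1) x
      simp only
      omega
    · rw [ih (st.1, 1) x (by omega) (by omega)]
      have := pvMaxRun_ge rest 1 x
      simp only
      omega

-- the bridge from A's index loop to the structural loop
theorem pvBridge (s : List Int) : ∀ (k : Nat) (st : Int × Int), k < s.length →
    (PySem.List.pyRange ((k : Int) + 1) (s.length : Int) 1).foldl
      (fun (st : Int × Int) i =>
        if PySem.List.pyGetD s i 0 = PySem.List.pyGetD s (i - 1) 0 + 1 then
          (max st.1 (st.2 + 1), st.2 + 1)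
        else
          (st.1, 1)) st
    = pvLoopA st (s.getD k 0) (s.drop (k + 1)) := by
  intro k
  induction hn : s.length - (k + 1) generalizing k with
  | zero =>
    intro st hk
    rw [PySem.List.pyRange_one_eq_nil (by omega)]
    have : s.drop (k + 1) = [] := List.drop_eq_nil_of_le (by omega)
    simp [this, pvLoopA]
  | succ n ih =>
    intro st hk
    have hk1 : k + 1 < s.length := by omega
    rw [PySem.List.pyRange_one_cons (by push_cast; omega)]
    simp only [List.foldl_cons]
    have hg : ∀ (m : Nat), m < s.length → PySem.List.pyGetD s (m : Int) 0 = s.getD m 0 := by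
      intro m _; simp [PySem.List.pyGetD_natCast]
    have e1 : PySem.List.pyGetD s ((k : Int) + 1) 0 = s.getD (k + 1) 0 := by
      have := hg (k + 1) hk1
      push_cast at this
      exact this
    have e0 : PySem.List.pyGetD s ((k : Int) + 1 - 1) 0 = s.getD k 0 := by
      have := hg k (by omega)
      simpa using this
    have hdrop : s.drop (k + 1) = s.getD (k + 1) 0 :: s.drop (k + 1 + 1) := by
      rw [List.getD_eq_getElem s 0 hk1, List.drop_eq_getElem_cons hk1]
    rw [e1, e0, hdrop]
    simp only [pvLoopA]
    split
    · have h2 := ih (k + 1) (by omega) (max st.1 (st.2 + 1), st.2 + 1) hk1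
      push_cast at h2
      exact h2
    · have h2 := ih (k + 1) (by omega) (st.1, 1) hk1
      push_cast at h2
      exact h2
  
theorem pvRuns (t : List Int) : ∀ prev,
    ((pvMaxRun 1 prev t ≤ 2 ↔ pvNoTriple (prev :: t) = true) ∧
     (pvMaxRun 2 prev t ≤ 2 ↔ (pvNoTriple (prev :: t) = true ∧ t.head? ≠ some (prev + 1)))) := by
  induction t with
  | nil => intro prev; simp [pvMaxRun, pvNoTriple]
  | cons x rest ih =>
    intro prev
    have ih1 := (ih x).1
    have ih2 := (ih x).2
    rcases rest with _ | ⟨c, r⟩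
    · by_cases hx : x = prev + 1 <;>
        simp [pvMaxRun, pvNoTriple, hx] <;> omega
    · by_cases hx : x = prev + 1
      · subst hx
        by_cases hc : c = prev + 1 + 1
        · subst hc
          have hge4 := pvMaxRun_ge r 4 (prev + 1 + 1)
          have hge3 := pvMaxRun_ge r 3 (prev + 1 + 1)
          simp [pvMaxRun, pvNoTriple] at ih1 ih2 ⊢
          all_goals omega
        · have hge2 := pvMaxRun_ge r 2 c
          have hge1 := pvMaxRun_ge r 1 c
          simp [pvMaxRun, pvNoTriple, hc] at ih1 ih2 ⊢
          all_goals omega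
      · by_cases hc : c = x + 1
        · subst hc
          have hge3 := pvMaxRun_ge r 3 (x + 1)
          have hge2 := pvMaxRun_ge r 2 (x + 1)
          simp [pvMaxRun, pvNoTriple, hx] at ih1 ih2 ⊢
          all_goals omega
        · have hge1 := pvMaxRun_ge r 1 c
          simp [pvMaxRun, pvNoTriple, hx, hc] at ih1 ih2 ⊢
          all_goals omega

-- ===== VERDICT (by name: the statement is the Claim_ definition above) =====
theorem check_consecutive_limit_spec : Claim_equal_check_consecutive_limit := by
  unfold Claim_equal_check_consecutive_limit Spec_check_consecutive_limit
  intro numbers _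
  simp only [check_consecutive_limit, check_consecutive_limit_alt]
  rcases hcs : PySem.List.sorted numbers (fun x => x) false with _ | ⟨p, t⟩
  · simp [PySem.List.pyRange_one_eq_nil, pvNoTriple]
  · have hb := pvBridge (p :: t) 0 (1, 1) (by simp)
    push_cast at hb
    simp only [List.getD, List.drop, List.getElem?_cons_zero, Option.getD_some] at hb
    rw [hb]
    have hfst := pvLoopA_fst t (1, 1) p (by norm_num) (by norm_num)
    simp only at hfst
    rw [hfst]
    have hge := pvMaxRun_ge t 1 p
    rw [max_eq_right hge]
    have h := (pvRuns t p).1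
    cases hnt : pvNoTriple (p :: t)
    · rw [hnt] at h
      exact decide_eq_false (fun hle => by simpa using h.mp hle)
    · rw [hnt] at h
      exact decide_eq_true (h.mpr rfl)
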